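-- pv_equiv track=rewrite | github.com/vatsramkesh/code_lg | stack/previous_smaller_element.py | smaller_elements
-- ===== SOURCE A (Python) =====
-- from typing import List
--
-- def smaller_elements(numbers: List) -> List[int]:
--     # O(n**2)
--     new_array = [-1]
--
--     for i, v in enumerate(numbers[1:], 1):
--         if v >= numbers[i-1]:
--             new_array.append(numbers[i-1])
--         else:
--             for k in new_array[::-1]:
--                 if k <= v:
--                     new_array.append(k)
--                     break
--
--     return new_array
-- ===== SOURCE B (Python) =====
-- def smaller_elements(numbers):
--     # One-pass monotonic stack (O(n)) instead of A's quadratic re-scan of the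
--     # result list; reproduces A's edge case where nothing is appended when no
--     # previous candidate <= v exists.
--     res = [-1]
--     st = [-1]
--     for i, v in enumerate(numbers):
--         while st and st[-1] > v:
--             st.pop()
--         if i and st:
--             res.append(st[-1])
--         st.append(v)
--     return res
-- ===== Notes on version B (the rewrite author's own statement) =====
-- stated objective: faster
-- what changed: Replaced A's per-element backward scan of the growing result list with a single-pass monotonic stack that pops candidates greater than the current value.
import Mathlib
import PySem

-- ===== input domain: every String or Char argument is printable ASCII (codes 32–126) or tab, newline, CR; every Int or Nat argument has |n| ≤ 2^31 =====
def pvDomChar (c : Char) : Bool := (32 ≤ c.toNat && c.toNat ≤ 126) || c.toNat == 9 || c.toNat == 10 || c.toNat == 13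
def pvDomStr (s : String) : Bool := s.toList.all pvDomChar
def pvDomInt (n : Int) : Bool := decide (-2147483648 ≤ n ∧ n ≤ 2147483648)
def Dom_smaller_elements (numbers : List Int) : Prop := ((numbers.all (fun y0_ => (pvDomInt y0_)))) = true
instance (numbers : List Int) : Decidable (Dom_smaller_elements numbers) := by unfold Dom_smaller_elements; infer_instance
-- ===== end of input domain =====

-- B replaces A's quadratic backward re-scan of the result list with a one-pass
-- monotonic stack; A = B on all inputs (both are total).

-- ===== PORT A =====
-- inner loop 'for k in new_array[::-1]: if k <= v: … break': first k ≤ v, else nothing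
def findLE (v : Int) : List Int → Option Int
  | [] => none
  | k :: rest => if k ≤ v then some k else findLE v rest

-- one iteration of A's main loop; iv = (i, v) from enumerate(numbers[1:], 1)
def aStep (numbers : List Int) (arr : List Int) (iv : Int × Int) : List Int :=
  match PySem.List.pyGet? numbers (iv.1 - 1) with
  | none => arr        -- unreachable: i-1 is always in range
  | some prev =>
      if iv.2 ≥ prev then arr ++ [prev]
      else
        -- new_array[::-1]; PySem.List.slice?_none_none_neg_one: this is reverse
        match findLE iv.2 ((PySem.List.slice? arr none none (-1)).getD []) with
        | some k => arr ++ [k]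
        | none => arr

def smaller_elements (numbers : List Int) : List Int :=
  (PySem.List.enumerate (PySem.List.slice numbers (some 1) none) 1).foldl
    (aStep numbers) [-1]

-- ===== PORT B =====
-- 'while st and st[-1] > v: st.pop()' (stack kept head = top)
def popGT (v : Int) : List Int → List Int
  | [] => []
  | k :: rest => if k > v then popGT v rest else k :: rest

-- one iteration of B's loop over enumerate(numbers); state = (res, st)
def bStep (p : List Int × List Int) (iv : Int × Int) : List Int × List Int :=
  let st1 := popGT iv.2 p.2
  let res1 := if iv.1 ≠ 0 then
                (match st1 with
                 | [] => p.1
                 | k :: _ => p.1 ++ [k])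
              else p.1
  (res1, iv.2 :: st1)

def smaller_elements_alt (numbers : List Int) : List Int :=
  ((PySem.List.enumerate numbers 0).foldl bStep ([-1], [-1])).1

-- ===== PRECONDITION & SPEC =====
def Spec_smaller_elements (numbers : List Int) (out : List Int) : Prop := out = smaller_elements_alt numbers
instance (numbers : List Int) (out : List Int) : Decidable (Spec_smaller_elements numbers out) := by unfold Spec_smaller_elements; infer_instance

-- ===== CLAIM (what is proved, stated in full; the proofs are below) =====
def Claim_equal_smaller_elements : Prop := ∀ (numbers : List Int), Dom_smaller_elements numbers → Spec_smaller_elements numbers (smaller_elements numbers)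

-- ===== LEMMAS AND PROOFS =====

-- recursion form of A's main loop: state = pool (= new_array), prev = numbers[i-1]
def goA : Int → List Int → List Int → List Int
  | _, pool, [] => pool
  | prev, pool, v :: rest =>
      goA v (if v ≥ prev then pool ++ [prev]
             else match findLE v pool.reverse with
                  | some k => pool ++ [k]
                  | none => pool) rest

-- recursion form of B's loop after index 0: state = (res, st)
def goB : (List Int × List Int) → List Int → (List Int × List Int)
  | p, [] => p
  | p, v :: rest =>
      goB (let st1 := popGT v p.2
           ((match st1 with
             | [] => p.1
             | k :: _ => p.1 ++ [k]), v :: st1)) rest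

theorem findLE_popGT_head (v : Int) (l : List Int) :
    findLE v l = (popGT v l).head? := by
  induction l with
  | nil => rfl
  | cons k rest ih =>
      by_cases h : k ≤ v
      · simp [findLE, popGT, h, not_lt.mpr h]
      · simp [findLE, popGT, h, lt_of_not_ge h, ih]

theorem findLE_popGT_le (v w : Int) (l : List Int) (hw : w ≤ v) :
    findLE w (popGT v l) = findLE w l := by
  induction l with
  | nil => rfl
  | cons k rest ih =>
      by_cases h : k > v
      · have : ¬ k ≤ w := by omega
        simp [popGT, findLE, h, this, ih]
      · simp [popGT, h]

theorem findLE_none_mono (v w : Int) (l : List Int) (hw : w ≤ v)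
    (h : findLE v l = none) : findLE w l = none := by
  induction l with
  | nil => rfl
  | cons k rest ih =>
      by_cases hk : k ≤ v
      · simp [findLE, hk] at h
      · have : ¬ k ≤ w := by omega
        simp [findLE, hk] at h
        simp [findLE, this, ih h]

-- the main invariant: A's pool answers the same "first candidate ≤ w" queries
-- (for w below the last value) as B's stack, hence both append the same items
theorem goA_eq_goB (rest : List Int) : ∀ (prev : Int) (pool st : List Int),
    (∀ w, w < prev → findLE w pool.reverse = findLE w st) →
    goA prev pool rest = (goB (pool, prev :: st) rest).1 := by
  induction rest with
  | nil => intro prev pool st _; rfl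
  | cons u rest' ih =>
      intro prev pool st H
      by_cases hup : u ≥ prev
      · -- no pop; both append prev
        have hpop : popGT u (prev :: st) = prev :: st := by
          simp [popGT, not_lt.mpr hup]
        simp only [goA, goB, hpop, hup, if_pos]
        apply ih
        intro w hw
        by_cases hp : prev ≤ w
        · simp [List.reverse_append, findLE, hp]
        · have hlt : w < prev := by omega
          simp [List.reverse_append, findLE, hp, H w hlt]
      · -- pop: A's scan result = head of popped stack
        have hu : u < prev := by omega
        have hpop : popGT u (prev :: st) = popGT u st := by
          simp [popGT, hu]
        have hq : findLE u pool.reverse = (popGT u st).head? := by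
          rw [H u hu, findLE_popGT_head]
        cases hst : popGT u st with
        | nil =>
            have hnone : findLE u pool.reverse = none := by rw [hq, hst]; rfl
            simp only [goA, goB, hpop, hst, hnone, if_neg hup]
            apply ih
            intro w hw
            have h1 : findLE w pool.reverse = none :=
              findLE_none_mono u w _ (le_of_lt hw) hnone
            rw [h1]; rfl
        | cons k st2 =>
            have hsome : findLE u pool.reverse = some k := by rw [hq, hst]; rfl
            simp only [goA, goB, hpop, hst, hsome, if_neg hup]
            apply ih
            intro w hw
            by_cases hk : k ≤ w
            · simp [List.reverse_append, findLE, hk]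
            · have hws : findLE w st = findLE w st2 := by
                have h2 := findLE_popGT_le u w st (le_of_lt hw)
                rw [hst] at h2
                simp only [findLE, if_neg hk] at h2
                exact h2.symm
              have hrev : (pool ++ [k]).reverse = k :: pool.reverse := by simp
              rw [hrev]
              simp only [findLE, if_neg hk]
              rw [H w (by omega), hws]

-- A's fold over enumerate(numbers[1:], 1) is goA
theorem foldA_eq (rest : List Int) : ∀ (k : Nat) (numbers pool : List Int) (prev : Int),
    numbers.drop k = prev :: rest →
    (PySem.List.enumerate rest ((k : Int) + 1)).foldl (aStep numbers) pool
      = goA prev pool rest := by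
  induction rest with
  | nil => intro k numbers pool prev _; rfl
  | cons v rest' ih =>
      intro k numbers pool prev h
      have hget : PySem.List.pyGet? numbers ((k : Int) + 1 - 1) = some prev := by
        have : ((k : Int) + 1 - 1) = ((k : Nat) : Int) := by omega
        rw [this, PySem.List.pyGet?_natCast]
        have h0 : (numbers.drop k)[0]? = some prev := by rw [h]; rfl
        rw [List.getElem?_drop] at h0
        simpa using h0
      have hdrop : numbers.drop (k + 1) = v :: rest' := by
        rw [← List.tail_drop, h]; rfl
      have hrev : (PySem.List.slice? pool none none (-1)).getD [] = pool.reverse := by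
        rw [PySem.List.slice?_none_none_neg_one]; rfl
      have hstep : aStep numbers pool ((k : Int) + 1, v)
          = (if v ≥ prev then pool ++ [prev]
             else match findLE v pool.reverse with
                  | some k => pool ++ [k]
                  | none => pool) := by
        simp only [aStep, hget, hrev]
      have hcast : ((k : Int) + 1) + 1 = (((k + 1 : Nat) : Int) + 1) := by omega
      simp only [PySem.List.enumerate_cons, List.foldl_cons, hstep, hcast, goA]
      exact ih (k + 1) numbers _ v hdrop

-- B's fold over enumerate(numbers, 0), split off index 0, is goB
theorem foldB_eq (rest : List Int) : ∀ (k : Nat) (p : List Int × List Int),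
    (PySem.List.enumerate rest ((k : Int) + 1)).foldl bStep p = goB p rest := by
  induction rest with
  | nil => intro k p; rfl
  | cons v rest' ih =>
      intro k p
      have hne : ((k : Int) + 1) ≠ 0 := by omega
      have hcast : ((k : Int) + 1) + 1 = (((k + 1 : Nat) : Int) + 1) := by omega
      simp only [PySem.List.enumerate_cons, List.foldl_cons, hcast, goB]
      rw [← ih (k + 1)]
      have hacc : bStep p ((k : Int) + 1, v)
          = ((match popGT v p.2 with
              | [] => p.1
              | j :: _ => p.1 ++ [j]), v :: popGT v p.2) := by
        simp [bStep, hne]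
      rw [hacc]

theorem A_eq_goA (x : Int) (rest : List Int) :
    smaller_elements (x :: rest) = goA x [-1] rest := by
  unfold smaller_elements
  rw [PySem.List.slice_from_one]
  have : ((1 : Int)) = ((0 : Nat) : Int) + 1 := by norm_num
  rw [show (x :: rest).tail = rest from rfl, this]
  exact foldA_eq rest 0 (x :: rest) [-1] x rfl

theorem B_eq_goB (x : Int) (rest : List Int) :
    smaller_elements_alt (x :: rest)
      = (goB ([-1], x :: popGT x [-1]) rest).1 := by
  unfold smaller_elements_alt
  rw [PySem.List.enumerate_cons, List.foldl_cons]
  have h0 : bStep ([-1], [-1]) (0, x) = ([-1], x :: popGT x [-1]) := by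
    simp [bStep]
  rw [h0]
  have : ((0 : Int) + 1) = ((0 : Nat) : Int) + 1 := by norm_num
  rw [this, foldB_eq rest 0]

-- ===== VERDICT (by name: the statement is the Claim_ definition above) =====
theorem smaller_elements_spec : Claim_equal_smaller_elements := by
  intro numbers _
  unfold Spec_smaller_elements
  cases numbers with
  | nil => rfl
  | cons x rest =>
      rw [A_eq_goA, B_eq_goB]
      apply goA_eq_goB
      intro w hw
      by_cases hx : (-1 : Int) > x
      · have : popGT x [-1] = [] := by simp [popGT, hx]
        rw [this]
        have : ¬ (-1 : Int) ≤ w := by omega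
        simp [findLE, this]
      · have : popGT x [-1] = [-1] := by simp [popGT, hx]
        rw [this]; rfl
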